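-- pv_equiv track=rewrite | github.com/sibyllinesoft/lethe | lethe-research/datasets/sources/transcript_crawler.py | _parse_wikipedia_sections
-- ===== SOURCE A (Python) =====
-- from typing import List, Dict, Optional, Iterator
--
-- def _parse_wikipedia_sections(content: str) -> List[tuple]:
--     """Parse Wikipedia talk page into sections."""
--     sections = []
--     current_section = ""
--     current_title = "General Discussion"
--
--     lines = content.split('\n')
--
--     for line in lines:
--         # Section headers start with ==
--         if line.strip().startswith('==') and line.strip().endswith('=='):
--             # Save previous section
--             if current_section.strip():
--                 sections.append((current_title, current_section.strip()))
--
--             # Start new section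
--             current_title = line.strip().replace('=', '').strip()
--             current_section = ""
--         else:
--             current_section += line + '\n'
--
--     # Add final section
--     if current_section.strip():
--         sections.append((current_title, current_section.strip()))
--
--     return sections
-- ===== SOURCE B (Python) =====
-- def _is_header(line):
--     s = line.strip()
--     return s.startswith('==') and s.endswith('==')
--
--
-- def _title_of(line):
--     return line.strip().replace('=', '').strip()
--
--
-- def _parse_wikipedia_sections(content):
--     """Parse Wikipedia talk page into sections (segment-at-headers decomposition)."""
--     lines = content.split('\n')
--     n = len(lines)
--     out = []
--     title = "General Discussion"
--     i = 0
--     while True: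
--         j = i
--         while j < n and not _is_header(lines[j]):
--             j += 1
--         body = '\n'.join(lines[i:j]).strip()
--         if body:
--             out.append((title, body))
--         if j == n:
--             return out
--         title = _title_of(lines[j])
--         i = j + 1
-- ===== Notes on version B (the rewrite author's own statement) =====
-- stated objective: alternative
-- what changed: B segments the split line list at header boundaries and builds each section body by joining the segment slice with the line separator, instead of A's running string accumulator that is flushed at every header.
import Mathlib
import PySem

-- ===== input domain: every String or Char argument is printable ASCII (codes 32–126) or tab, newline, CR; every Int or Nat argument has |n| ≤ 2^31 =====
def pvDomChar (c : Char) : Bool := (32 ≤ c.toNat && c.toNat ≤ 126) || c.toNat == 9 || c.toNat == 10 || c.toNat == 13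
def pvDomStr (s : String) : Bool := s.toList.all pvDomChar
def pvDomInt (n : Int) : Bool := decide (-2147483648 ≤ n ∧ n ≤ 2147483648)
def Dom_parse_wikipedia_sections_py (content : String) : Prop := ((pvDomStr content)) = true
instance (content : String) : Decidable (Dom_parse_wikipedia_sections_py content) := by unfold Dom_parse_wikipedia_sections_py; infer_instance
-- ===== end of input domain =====

-- B segments the line list at header boundaries and joins each segment, instead of A's running accumulator; alternative decomposition, same cost.


-- ===== PORT A =====
-- "save previous section": append (title, current_section.strip()) when non-empty
def pvIfneA (cur title : List Char) : List (String × String) :=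
  if PySem.Chars.strip cur ≠ [] then [(String.ofList title, String.ofList (PySem.Chars.strip cur))] else []

-- the body of A's for-loop, state = (sections, current_section, current_title)
def pvStepA (st : List (String × String) × List Char × List Char) (line : List Char) :
    List (String × String) × List Char × List Char :=
  if PySem.Chars.startswith (PySem.Chars.strip line) ['=', '='] &&
     PySem.Chars.endswith (PySem.Chars.strip line) ['=', '='] then
    (st.1 ++ pvIfneA st.2.1 st.2.2, [],
     PySem.Chars.strip (PySem.Chars.replace (PySem.Chars.strip line) ['='] []))
  else
    (st.1, st.2.1 ++ line ++ ['\n'], st.2.2)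

def parse_wikipedia_sections_py (content : String) : List (String × String) :=
  let st := (PySem.Chars.splitOn content.toList ['\n']).foldl pvStepA
      ([], [], "General Discussion".toList)
  st.1 ++ pvIfneA st.2.1 st.2.2

-- ===== PORT B =====
def pvIsHeader (line : List Char) : Bool :=
  PySem.Chars.startswith (PySem.Chars.strip line) ['=', '='] &&
  PySem.Chars.endswith (PySem.Chars.strip line) ['=', '=']

def pvTitleOf (line : List Char) : List Char :=
  PySem.Chars.strip (PySem.Chars.replace (PySem.Chars.strip line) ['='] [])

-- Source B's outer while-loop: take the segment up to the next header, emit, recurse past it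
def pvSections (lines : List (List Char)) (title : List Char) : List (String × String) :=
  let seg := lines.takeWhile (fun l => !pvIsHeader l)
  let body := PySem.Chars.strip (PySem.Chars.join ['\n'] seg)
  let head := if body = [] then [] else [(String.ofList title, String.ofList body)]
  match hdw : lines.dropWhile (fun l => !pvIsHeader l) with
  | [] => head
  | l :: rest => head ++ pvSections rest (pvTitleOf l)
termination_by lines.length
decreasing_by
  have h1 := List.length_dropWhile_le (fun l => !pvIsHeader l) lines
  rw [hdw] at h1
  simp at h1
  omega

def parse_wikipedia_sections_py_alt (content : String) : List (String × String) :=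
  pvSections (PySem.Chars.splitOn content.toList ['\n']) "General Discussion".toList

-- ===== PRECONDITION & SPEC =====
def Spec_parse_wikipedia_sections_py (content : String) (out : List (String × String)) : Prop := out = parse_wikipedia_sections_py_alt content
instance (content : String) (out : List (String × String)) : Decidable (Spec_parse_wikipedia_sections_py content out) := by unfold Spec_parse_wikipedia_sections_py; infer_instance

-- ===== CLAIM (what is proved, stated in full; the proofs are below) =====
def Claim_equal_parse_wikipedia_sections_py : Prop := ∀ (content : String), Dom_parse_wikipedia_sections_py content → Spec_parse_wikipedia_sections_py content (parse_wikipedia_sections_py content)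

-- ===== LEMMAS AND PROOFS =====

-- A's accumulator over a segment is the per-line concatenation of line + '\n'
def pvJoinN (seg : List (List Char)) : List Char := (seg.map (· ++ ['\n'])).flatten

-- the finalisation A performs on its loop state
def pvFinish (st : List (String × String) × List Char × List Char) : List (String × String) :=
  st.1 ++ pvIfneA st.2.1 st.2.2

-- what B does after finishing a segment: nothing at end-of-input, else recurse past the header
def pvTail (lines : List (List Char)) : List (String × String) :=
  match lines with
  | [] => []
  | l :: rest => pvSections rest (pvTitleOf l)

lemma pvStrip_newline (s : List Char) :
    PySem.Chars.strip (s ++ ['\n']) = PySem.Chars.strip s := by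
  unfold PySem.Chars.strip PySem.Chars.lstrip PySem.Chars.rstrip
  cases hd : List.dropWhile PySem.Chars.isspace s with
  | nil =>
      have h2 : List.dropWhile PySem.Chars.isspace (s ++ ['\n']) = [] := by
        rw [List.dropWhile_append, hd]
        simp
        decide
      rw [h2]
  | cons x xs =>
      have h2 : List.dropWhile PySem.Chars.isspace (s ++ ['\n']) = x :: (xs ++ ['\n']) := by
        simp [List.dropWhile_append, hd]
      rw [h2]
      have h3 : (x :: (xs ++ ['\n'])).reverse = '\n' :: (x :: xs).reverse := by simp
      rw [h3, List.dropWhile_cons_of_pos (by decide : PySem.Chars.isspace '\n' = true)]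

lemma pvJoinN_eq (seg : List (List Char)) :
    pvJoinN seg = if seg = [] then [] else PySem.Chars.join ['\n'] seg ++ ['\n'] := by
  induction seg with
  | nil => simp [pvJoinN]
  | cons x t ih =>
      cases t with
      | nil => simp [pvJoinN, PySem.Chars.join, List.intercalate]
      | cons y u =>
          simp only [pvJoinN, List.map_cons, List.flatten_cons] at *
          rw [ih]
          simp [PySem.Chars.join_cons_cons]

lemma pvStrip_joinN (seg : List (List Char)) :
    PySem.Chars.strip (pvJoinN seg) = PySem.Chars.strip (PySem.Chars.join ['\n'] seg) := by
  by_cases hseg : seg = []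
  · subst hseg
    simp [pvJoinN, PySem.Chars.join, List.intercalate]
  · rw [pvJoinN_eq, if_neg hseg]
    exact pvStrip_newline _

lemma pvHead_eq (seg : List (List Char)) (t : List Char) :
    pvIfneA (pvJoinN seg) t =
      (if PySem.Chars.strip (PySem.Chars.join ['\n'] seg) = [] then []
       else [(String.ofList t, String.ofList (PySem.Chars.strip (PySem.Chars.join ['\n'] seg)))]) := by
  unfold pvIfneA
  rw [pvStrip_joinN]
  by_cases hb : PySem.Chars.strip (PySem.Chars.join ['\n'] seg) = [] <;> simp [hb]

lemma pvP (lines : List (List Char)) (t : List Char) :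
    pvSections lines t =
      pvIfneA (pvJoinN (lines.takeWhile (fun l => !pvIsHeader l))) t ++
        pvTail (lines.dropWhile (fun l => !pvIsHeader l)) := by
  rw [pvHead_eq]
  conv_lhs => rw [pvSections.eq_def]
  split
  next heq => rw [heq]; simp [pvTail]
  next l rest heq => rw [heq]; simp [pvTail]

lemma pvL1 (lines : List (List Char)) :
    ∀ (secs : List (String × String)) (cur t : List Char),
      pvFinish (lines.foldl pvStepA (secs, cur, t)) =
        secs ++ pvFinish (lines.foldl pvStepA ([], cur, t)) := by
  induction lines with
  | nil => intro secs cur t; simp [pvFinish]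
  | cons l rest ih =>
      intro secs cur t
      simp only [List.foldl_cons, pvStepA]
      by_cases hh : (PySem.Chars.startswith (PySem.Chars.strip l) ['=', '='] &&
          PySem.Chars.endswith (PySem.Chars.strip l) ['=', '=']) = true
      · simp only [hh, if_true, List.nil_append]
        rw [ih, ih (pvIfneA cur t)]
        simp [List.append_assoc]
      · simp only [hh, Bool.false_eq_true, if_false]
        rw [ih, ih]

lemma pvM (lines : List (List Char)) :
    ∀ (cur t : List Char),
      pvFinish (lines.foldl pvStepA ([], cur, t)) =
        pvIfneA (cur ++ pvJoinN (lines.takeWhile (fun l => !pvIsHeader l))) t ++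
          pvTail (lines.dropWhile (fun l => !pvIsHeader l)) := by
  induction lines with
  | nil => intro cur t; simp [pvFinish, pvJoinN, pvTail]
  | cons l rest ih =>
      intro cur t
      by_cases hh : pvIsHeader l = true
      · have hc : (PySem.Chars.startswith (PySem.Chars.strip l) ['=', '='] &&
            PySem.Chars.endswith (PySem.Chars.strip l) ['=', '=']) = true := hh
        simp only [List.foldl_cons, pvStepA, hc, if_true,
          List.takeWhile_cons, List.dropWhile_cons, hh, Bool.not_true,
          Bool.false_eq_true, if_false]
        rw [pvL1, ih]
        simp only [List.nil_append]
        have hT : pvTail (l :: rest) = pvSections rest (pvTitleOf l) := rfl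
        rw [hT, pvP rest (pvTitleOf l)]
        simp [pvTitleOf, pvJoinN]
      · have hc : (PySem.Chars.startswith (PySem.Chars.strip l) ['=', '='] &&
            PySem.Chars.endswith (PySem.Chars.strip l) ['=', '=']) = false := by
          simpa [pvIsHeader] using hh
        have hh' : (!pvIsHeader l) = true := by simp [hh]
        simp only [List.foldl_cons, pvStepA, hc, Bool.false_eq_true, if_false,
          List.takeWhile_cons, List.dropWhile_cons, hh', if_true]
        rw [ih]
        simp [pvJoinN, List.append_assoc]

-- ===== VERDICT (by name: the statement is the Claim_ definition above) =====
theorem parse_wikipedia_sections_py_spec : Claim_equal_parse_wikipedia_sections_py := by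
  intro content _
  show parse_wikipedia_sections_py content = parse_wikipedia_sections_py_alt content
  have hA : parse_wikipedia_sections_py content =
      pvFinish ((PySem.Chars.splitOn content.toList ['\n']).foldl pvStepA
        ([], [], "General Discussion".toList)) := rfl
  rw [hA, pvM]
  unfold parse_wikipedia_sections_py_alt
  rw [pvP]
  simp
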